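-- pv_equiv track=rewrite | github.com/binarybottle/optimize_layouts | parallel_optimize_layout.py | _create_moo_chunks
-- ===== SOURCE A (Python) =====
-- from typing import Dict, Tuple, List, Optional
--
-- def _create_moo_chunks(items: List, positions: List, chunk_size: int) -> List[List]:
--     """Create chunks of permutations for MOO processing."""
--     from itertools import permutations, islice
--
--     def chunked_permutations(iterable, chunk_size):
--         iterator = permutations(iterable)
--         while True:
--             chunk = list(islice(iterator, chunk_size))
--             if not chunk:
--                 break
--             yield chunk
--
--     return list(chunked_permutations(items, chunk_size))
-- ===== SOURCE B (Python) =====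
-- def _create_moo_chunks(items, positions, chunk_size):
--     """Create chunks of permutations for MOO processing."""
--     from itertools import permutations
--     perms = list(permutations(items))
--     return [perms[i:i + chunk_size] for i in range(0, len(perms), chunk_size)]
-- ===== Notes on version B (the rewrite author's own statement) =====
-- stated objective: idiomatic
-- what changed: B materializes the full permutation list once and slices it by an index-stepping range, replacing A's lazy generator that repeatedly drains the iterator with islice inside a while loop.
-- outside the precondition, e.g. on _create_moo_chunks([1, 2], [], 0): A returns [], B raises ValueError
import Mathlib
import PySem

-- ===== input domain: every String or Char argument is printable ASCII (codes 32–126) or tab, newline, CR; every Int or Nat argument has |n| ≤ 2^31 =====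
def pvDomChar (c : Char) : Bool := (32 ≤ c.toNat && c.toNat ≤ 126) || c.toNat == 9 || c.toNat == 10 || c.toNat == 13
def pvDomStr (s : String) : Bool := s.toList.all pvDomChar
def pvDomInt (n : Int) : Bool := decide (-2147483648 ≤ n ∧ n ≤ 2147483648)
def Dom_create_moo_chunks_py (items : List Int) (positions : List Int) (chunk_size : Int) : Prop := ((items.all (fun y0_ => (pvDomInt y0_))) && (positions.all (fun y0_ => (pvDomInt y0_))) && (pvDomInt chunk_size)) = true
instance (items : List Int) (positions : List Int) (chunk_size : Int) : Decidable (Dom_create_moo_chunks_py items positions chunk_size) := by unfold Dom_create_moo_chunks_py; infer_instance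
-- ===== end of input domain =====

-- B replaces A's lazy while/islice draining generator with materialize-then-slice by an
-- index-stepping range (idiomatic; same cost).


-- ===== PORT A =====
-- A's inner generator: repeatedly take the next chunk_size permutations (islice) and stop
-- when the chunk comes back empty.
def pvDrainA (l : List (List Int)) (k : Int) : List (List (List Int)) :=
  if h : l.take k.toNat = [] then []
  else l.take k.toNat :: pvDrainA (l.drop k.toNat) k
termination_by l.length
decreasing_by
  simp only [List.take_eq_nil_iff, not_or] at h
  have hpos : 0 < l.length := List.length_pos_iff.mpr h.2
  simp only [List.length_drop]
  omega

def create_moo_chunks_py (items : List Int) (positions : List Int) (chunk_size : Int) : List (List (List Int)) :=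
  pvDrainA (PySem.List.permutations items items.length) chunk_size

-- ===== PORT B =====
def create_moo_chunks_py_alt (items : List Int) (positions : List Int) (chunk_size : Int) : List (List (List Int)) :=
  let perms := PySem.List.permutations items items.length
  (PySem.List.pyRange 0 (perms.length : Int) chunk_size).map
    (fun i => PySem.List.slice perms (some i) (some (i + chunk_size)))

-- ===== PRECONDITION & SPEC =====
-- Pre_ excludes chunk_size ≤ 0: for negative chunk_size A raises ValueError (islice rejects it),
-- and for chunk_size == 0 A's returning [] is an accident of islice on which B's natural
-- range-based slicing itself raises ValueError.
def Pre_create_moo_chunks_py (items : List Int) (positions : List Int) (chunk_size : Int) : Prop :=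
  1 ≤ chunk_size
instance (items : List Int) (positions : List Int) (chunk_size : Int) : Decidable (Pre_create_moo_chunks_py items positions chunk_size) := by unfold Pre_create_moo_chunks_py; infer_instance

def pvWitness_create_moo_chunks_py : List Int × List Int × Int := ([1, 2, 3], [0, 1, 2], 2)

def Spec_create_moo_chunks_py (items : List Int) (positions : List Int) (chunk_size : Int) (out : List (List (List Int))) : Prop := out = create_moo_chunks_py_alt items positions chunk_size
instance (items : List Int) (positions : List Int) (chunk_size : Int) (out : List (List (List Int))) : Decidable (Spec_create_moo_chunks_py items positions chunk_size out) := by unfold Spec_create_moo_chunks_py; infer_instance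

-- ===== CLAIM (what is proved, stated in full; the proofs are below) =====
def Claim_equal_create_moo_chunks_py : Prop := ∀ (items : List Int) (positions : List Int) (chunk_size : Int), Dom_create_moo_chunks_py items positions chunk_size → Pre_create_moo_chunks_py items positions chunk_size → Spec_create_moo_chunks_py items positions chunk_size (create_moo_chunks_py items positions chunk_size)


-- ===== LEMMAS AND PROOFS =====

-- Common Nat-indexed chunk form both ports are reduced to.
def pvChunksIdx (l : List (List Int)) (k : Nat) : List (List (List Int)) :=
  (List.range ((l.length + k - 1) / k)).map (fun j => (l.drop (k * j)).take k)

lemma drainA_eq_chunksIdx (k : Nat) (hk : 1 ≤ k) :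
    ∀ (l : List (List Int)), pvDrainA l (k : Int) = pvChunksIdx l k := by
  intro l
  induction hn : l.length using Nat.strong_induction_on generalizing l with
  | _ n ih =>
    subst hn
    unfold pvDrainA
    simp only [Int.toNat_natCast]
    by_cases hl : l = []
    · subst hl
      have hc : ((List.length ([] : List (List Int))) + k - 1) / k = 0 :=
        Nat.div_eq_of_lt (by simp; omega)
      simp [pvChunksIdx]
      omega
    · have hlen : 1 ≤ l.length := by
        cases l with
        | nil => exact absurd rfl hl
        | cons a t => simp
      have htake : l.take k ≠ [] := by
        intro hEq
        rcases List.take_eq_nil_iff.mp hEq with h | h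
        · omega
        · exact hl h
      rw [dif_neg htake]
      have hdrop : (l.drop k).length < l.length := by
        simp [List.length_drop]; omega
      rw [ih (l.drop k).length hdrop (l.drop k) rfl]
      unfold pvChunksIdx
      have hL : (l.length + k - 1) / k = (l.length - 1) / k + 1 := by
        have h1 : l.length + k - 1 = (l.length - 1) + k := by omega
        rw [h1, Nat.add_div_right _ (by omega)]
      have hR : ((l.drop k).length + k - 1) / k = (l.length - 1) / k := by
        rw [List.length_drop]
        by_cases hc : k ≤ l.length
        · congr 1; omega
        · have h1 : l.length - k = 0 := by omega
          rw [h1, Nat.div_eq_of_lt (by omega), Nat.div_eq_of_lt (by omega)]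
      rw [hL, ← hR, List.range_succ_eq_map]
      simp only [List.map_cons, List.map_map, Nat.mul_zero, List.drop_zero]
      refine List.cons_eq_cons.mpr ⟨rfl, ?_⟩
      apply List.map_congr_left
      intro j _
      simp only [Function.comp_apply, List.drop_drop]
      congr 2
      rw [Nat.mul_succ]
      omega

lemma altB_eq_chunksIdx (perms : List (List Int)) (k : Nat) (hk : 1 ≤ k) :
    (PySem.List.pyRange 0 (perms.length : Int) (k : Int)).map
      (fun i => PySem.List.slice perms (some i) (some (i + (k : Int)))) = pvChunksIdx perms k := by
  rw [PySem.List.pyRange_of_pos 0 (perms.length : Int) (show (0:Int) < (k:Int) by exact_mod_cast hk)]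
  unfold pvChunksIdx
  have hcount : (if (0 : Int) < (perms.length : Int) then (((perms.length : Int) - 0 + (k : Int) - 1) / (k : Int)).toNat else 0)
      = (perms.length + k - 1) / k := by
    by_cases hp : 0 < perms.length
    · rw [if_pos (by exact_mod_cast hp)]
      have : ((perms.length : Int) - 0 + (k : Int) - 1) = ((perms.length + k - 1 : Nat) : Int) := by
        omega
      rw [this, ← Int.natCast_div, Int.toNat_natCast]
    · rw [if_neg (by omega)]
      have h0 : perms.length = 0 := by omega
      rw [h0]
      rw [Nat.div_eq_of_lt (by omega)]
  rw [hcount, List.map_map]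
  apply List.map_congr_left
  intro j _
  simp only [Function.comp_apply, zero_add]
  have h1 : (k : Int) * (j : Int) = ((k * j : Nat) : Int) := by push_cast; ring
  rw [h1, PySem.List.slice_natCast_add]

-- ===== VERDICT (by name: the statement is the Claim_ definition above) =====
theorem create_moo_chunks_py_spec : Claim_equal_create_moo_chunks_py := by
  intro items positions chunk_size _hDom hPre
  unfold Pre_create_moo_chunks_py at hPre
  unfold Spec_create_moo_chunks_py create_moo_chunks_py create_moo_chunks_py_alt
  have hk : chunk_size = ((chunk_size.toNat : Nat) : Int) := by
    have : (0:Int) ≤ chunk_size := le_trans (by norm_num) hPre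
    omega
  rw [hk]
  rw [drainA_eq_chunksIdx chunk_size.toNat (by omega)]
  rw [altB_eq_chunksIdx _ chunk_size.toNat (by omega)]
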